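-- pv_equiv track=rewrite | github.com/ljthink/BlindAIRobot | BlindRobot.py | checkDirs
-- ===== SOURCE A (Python) =====
-- def checkDirs(main, nMain, dimensions):
--
--     i,j = main
--     k = j + i*dimensions
--     nIndex = nMain[k]
--
--
--     neighbors = [[int(i/dimensions), i%dimensions] for i in nMain[k]]
--     if sorted([[i+1,j], [i, j+1]]) == sorted(neighbors):
--         return True
--     if sorted([[i-1,j], [i, j+1]]) == sorted(neighbors):
--         return True
--     if sorted([[i+1,j], [i, j-1]]) == sorted(neighbors):
--         return True
--     if sorted([[i-1,j], [i, j-1]]) == sorted(neighbors):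
--         return True
--
--     return False
-- ===== SOURCE B (Python) =====
-- def checkDirs(main, nMain, dimensions):
--     i, j = main
--     k = j + i * dimensions
--     neighbors = [(int(x / dimensions), x % dimensions) for x in nMain[k]]
--     if len(neighbors) != 2:
--         return False
--     (r1, c1), (r2, c2) = neighbors
--
--     def vertical(r, c):
--         return c == j and (r == i - 1 or r == i + 1)
--
--     def horizontal(r, c):
--         return r == i and (c == j - 1 or c == j + 1)
--
--     return (vertical(r1, c1) and horizontal(r2, c2)) or \
--            (vertical(r2, c2) and horizontal(r1, c1))
-- ===== Notes on version B (the rewrite author's own statement) =====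
-- stated objective: simpler
-- what changed: Replaces the four sorted-list pattern comparisons by a length-2 guard plus one symmetric offset predicate (one neighbor is a vertical step, the other a horizontal step), removing all sorting.
import Mathlib
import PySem

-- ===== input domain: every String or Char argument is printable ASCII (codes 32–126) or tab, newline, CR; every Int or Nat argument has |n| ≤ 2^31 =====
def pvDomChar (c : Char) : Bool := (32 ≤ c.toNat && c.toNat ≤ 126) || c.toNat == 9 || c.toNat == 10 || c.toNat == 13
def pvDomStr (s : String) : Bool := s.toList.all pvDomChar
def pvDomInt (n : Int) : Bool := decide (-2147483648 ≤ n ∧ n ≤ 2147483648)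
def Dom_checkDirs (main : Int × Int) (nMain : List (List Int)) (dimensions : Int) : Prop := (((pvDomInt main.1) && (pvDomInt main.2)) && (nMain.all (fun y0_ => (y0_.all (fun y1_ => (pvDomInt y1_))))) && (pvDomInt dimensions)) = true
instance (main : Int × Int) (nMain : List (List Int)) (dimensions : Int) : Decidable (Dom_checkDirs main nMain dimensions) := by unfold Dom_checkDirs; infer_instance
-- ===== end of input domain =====

-- B replaces A's four sorted-pattern comparisons by a length-2 guard plus one symmetric
-- vertical/horizontal offset predicate (objective: simpler — no sorting, one predicate).

-- ===== PORT A =====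
-- int(x / dimensions) is float division truncated toward zero; exact as Int.tdiv here
-- (|x|, |dimensions| ≤ 2^31 < 2^53, see PySem.Int.truncdiv's contract).
def checkDirs (main : Int × Int) (nMain : List (List Int)) (dimensions : Int) : Bool :=
  let i := main.1
  let j := main.2
  let k := j + i * dimensions
  let neighbors := (PySem.List.pyGetD nMain k []).map
    (fun x => (PySem.Int.truncdiv x dimensions, PySem.Int.mod x dimensions))
  let s := PySem.List.sorted2 neighbors Prod.fst Prod.snd
  if PySem.List.sorted2 [(i+1, j), (i, j+1)] Prod.fst Prod.snd = s then true
  else if PySem.List.sorted2 [(i-1, j), (i, j+1)] Prod.fst Prod.snd = s then true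
  else if PySem.List.sorted2 [(i+1, j), (i, j-1)] Prod.fst Prod.snd = s then true
  else if PySem.List.sorted2 [(i-1, j), (i, j-1)] Prod.fst Prod.snd = s then true
  else false

-- ===== PORT B =====
def pvVertical (i j r c : Int) : Bool := c == j && (r == i - 1 || r == i + 1)

def pvHorizontal (i j r c : Int) : Bool := r == i && (c == j - 1 || c == j + 1)

def checkDirs_alt (main : Int × Int) (nMain : List (List Int)) (dimensions : Int) : Bool :=
  let i := main.1
  let j := main.2
  let k := j + i * dimensions
  let neighbors := (PySem.List.pyGetD nMain k []).map
    (fun x => (PySem.Int.truncdiv x dimensions, PySem.Int.mod x dimensions))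
  match neighbors with
  | [(r1, c1), (r2, c2)] =>
      (pvVertical i j r1 c1 && pvHorizontal i j r2 c2) ||
      (pvVertical i j r2 c2 && pvHorizontal i j r1 c1)
  | _ => false

-- ===== PRECONDITION & SPEC =====
-- Pre_ excludes exactly the inputs where the Python raises (B raises there too):
-- index k = j + i*dimensions out of range for nMain (IndexError), or dimensions = 0
-- with a nonempty neighbor list (ZeroDivisionError inside the comprehension).
def Pre_checkDirs (main : Int × Int) (nMain : List (List Int)) (dimensions : Int) : Prop :=
  PySem.Raise.InRange nMain.length (main.2 + main.1 * dimensions) ∧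
  (dimensions ≠ 0 ∨ PySem.List.pyGetD nMain (main.2 + main.1 * dimensions) [] = [])
instance (main : Int × Int) (nMain : List (List Int)) (dimensions : Int) : Decidable (Pre_checkDirs main nMain dimensions) := by unfold Pre_checkDirs; infer_instance

def pvWitness_checkDirs : (Int × Int) × List (List Int) × Int := ((1, 0), [[1], [3], [1, 3]], 2)

def Spec_checkDirs (main : Int × Int) (nMain : List (List Int)) (dimensions : Int) (out : Bool) : Prop := out = checkDirs_alt main nMain dimensions
instance (main : Int × Int) (nMain : List (List Int)) (dimensions : Int) (out : Bool) : Decidable (Spec_checkDirs main nMain dimensions out) := by unfold Spec_checkDirs; infer_instance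

-- ===== CLAIM (what is proved, stated in full; the proofs are below) =====
def Claim_equal_checkDirs : Prop := ∀ (main : Int × Int) (nMain : List (List Int)) (dimensions : Int), Dom_checkDirs main nMain dimensions → Pre_checkDirs main nMain dimensions → Spec_checkDirs main nMain dimensions (checkDirs main nMain dimensions)

-- ===== LEMMAS AND PROOFS =====

-- sorted2 of a two-element list, written out (Python's lexicographic pair order).
lemma sorted2_two (a b : Int × Int) :
    PySem.List.sorted2 [a, b] Prod.fst Prod.snd
      = if b.1 < a.1 ∨ (¬ a.1 < b.1 ∧ b.2 < a.2) then [b, a] else [a, b] := by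
  simp only [PySem.List.sorted2, PySem.List.insertBy, List.foldl]
  split_ifs <;> (simp_all; try omega)

-- The whole comparison, for an arbitrary decoded neighbor list ns.
-- A two-element sorted pattern never equals the sort of a list of another length.
lemma sorted2_pattern_ne (a b : Int × Int) (ns : List (Int × Int)) (h : ns.length ≠ 2) :
    PySem.List.sorted2 [a, b] Prod.fst Prod.snd ≠ PySem.List.sorted2 ns Prod.fst Prod.snd := by
  intro he
  have h2 := congrArg List.length he
  rw [sorted2_two] at h2
  have hl := (PySem.List.sorted2_perm ns Prod.fst Prod.snd false).length_eq
  split_ifs at h2 <;> simp_all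

set_option maxHeartbeats 1600000 in
lemma core_eq (i j : Int) (ns : List (Int × Int)) :
    ((if PySem.List.sorted2 [(i+1, j), (i, j+1)] Prod.fst Prod.snd = PySem.List.sorted2 ns Prod.fst Prod.snd then true
      else if PySem.List.sorted2 [(i-1, j), (i, j+1)] Prod.fst Prod.snd = PySem.List.sorted2 ns Prod.fst Prod.snd then true
      else if PySem.List.sorted2 [(i+1, j), (i, j-1)] Prod.fst Prod.snd = PySem.List.sorted2 ns Prod.fst Prod.snd then true
      else if PySem.List.sorted2 [(i-1, j), (i, j-1)] Prod.fst Prod.snd = PySem.List.sorted2 ns Prod.fst Prod.snd then true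
      else false) : Bool)
    = match ns with
      | [(r1, c1), (r2, c2)] =>
          (pvVertical i j r1 c1 && pvHorizontal i j r2 c2) ||
          (pvVertical i j r2 c2 && pvHorizontal i j r1 c1)
      | _ => false := by
  match ns with
  | [(r1, c1), (r2, c2)] =>
      simp only [sorted2_two]
      norm_num
      split_ifs <;> simp_all [pvVertical, pvHorizontal] <;> rw [Bool.eq_iff_iff] <;>
        simp only [Bool.or_eq_true, Bool.and_eq_true, decide_eq_true_eq, beq_iff_eq] <;> omega
  | [] =>
      rw [if_neg (sorted2_pattern_ne _ _ _ (by simp)), if_neg (sorted2_pattern_ne _ _ _ (by simp)),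
          if_neg (sorted2_pattern_ne _ _ _ (by simp)), if_neg (sorted2_pattern_ne _ _ _ (by simp))]
  | [x] =>
      rw [if_neg (sorted2_pattern_ne _ _ _ (by simp)), if_neg (sorted2_pattern_ne _ _ _ (by simp)),
          if_neg (sorted2_pattern_ne _ _ _ (by simp)), if_neg (sorted2_pattern_ne _ _ _ (by simp))]
  | (p :: q :: r :: u) =>
      rw [if_neg (sorted2_pattern_ne _ _ _ (by simp)), if_neg (sorted2_pattern_ne _ _ _ (by simp)),
          if_neg (sorted2_pattern_ne _ _ _ (by simp)), if_neg (sorted2_pattern_ne _ _ _ (by simp))]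

-- ===== VERDICT (by name: the statement is the Claim_ definition above) =====
theorem checkDirs_spec : Claim_equal_checkDirs := by
  intro main nMain dimensions _ _
  unfold Spec_checkDirs checkDirs checkDirs_alt
  exact core_eq main.1 main.2 _
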